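-- pv_equiv track=rewrite | github.com/JulyelsonSilva/ECC_Fase1 | app.py | _csv_ids_unique
-- ===== SOURCE A (Python) =====
-- def _csv_ids_unique(raw: str):
--     raw = (raw or "").replace(";", ",")
--     out = []
--     seen = set()
--     for part in raw.split(","):
--         p = part.strip()
--         if not p:
--             continue
--         if not p.isdigit():
--             continue
--         val = int(p)
--         if val not in seen:
--             seen.add(val)
--             out.append(val)
--     return out
-- ===== SOURCE B (Python) =====
-- def _dedup(nums):
--     # first-occurrence dedup by recursion: keep the head, drop its copies, recurse
--     if not nums:
--         return []
--     head = nums[0]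
--     return [head] + _dedup([v for v in nums[1:] if v != head])
--
--
-- def _csv_ids_unique(raw: str):
--     nums = []
--     for chunk in (raw or "").split(";"):
--         for part in chunk.split(","):
--             t = part.strip()
--             if t.isdigit():
--                 nums.append(int(t))
--     return _dedup(nums)
-- ===== Notes on version B (the rewrite author's own statement) =====
-- stated objective: alternative
-- what changed: Parsing is decomposed as a nested split (on ';' then ',') instead of replace-then-single-split, and deduplication is a separate recursive nub (keep head, filter out its copies, recurse) instead of a seen-set threaded through the parsing loop.
import Mathlib
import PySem

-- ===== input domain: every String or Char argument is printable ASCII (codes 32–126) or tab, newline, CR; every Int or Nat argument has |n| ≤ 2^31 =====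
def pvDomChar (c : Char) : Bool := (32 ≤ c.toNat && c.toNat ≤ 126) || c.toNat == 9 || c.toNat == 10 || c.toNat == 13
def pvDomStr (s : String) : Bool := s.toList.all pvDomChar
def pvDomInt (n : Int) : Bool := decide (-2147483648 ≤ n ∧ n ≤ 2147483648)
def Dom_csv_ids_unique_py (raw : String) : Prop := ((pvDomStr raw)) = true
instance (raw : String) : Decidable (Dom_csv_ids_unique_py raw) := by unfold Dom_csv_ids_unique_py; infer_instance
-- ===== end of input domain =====

-- B parses by a nested split (on ';' then ',') instead of replace-then-split and
-- dedups afterwards by a recursive nub instead of a seen-set threaded through the loop.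

-- ===== PORT A =====
-- one iteration of A's loop body: strip, skip empty / non-digit parts, then append if unseen
-- (int(p) cannot fail after isdigit, so the total (… ).getD 0 is exact on the reached branch)
def csvStepA (st : List Int × PySem.Set Int) (part : String) : List Int × PySem.Set Int :=
  let p := PySem.Str.strip part
  if p = "" then st
  else if PySem.Str.strIsdigit p = false then st
  else
    let val := (PySem.Int.ofStr? p).getD 0
    if PySem.Set.contains st.2 val then st
    else (st.1 ++ [val], PySem.Set.add st.2 val)

def csv_ids_unique_py (raw : String) : List Int :=
  -- (raw or "") is raw itself for strings; "" stays ""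
  let s := PySem.Str.replace raw ";" ","
  (((PySem.Str.split? s ",").getD []).foldl csvStepA ([], PySem.Set.empty)).1

-- ===== PORT B =====
-- B's inner loop over one chunk: append int(t) for every digit token t
def csvCollect (nums : List Int) (chunk : String) : List Int :=
  ((PySem.Str.split? chunk ",").getD []).foldl
    (fun acc part =>
      let t := PySem.Str.strip part
      if PySem.Str.strIsdigit t then acc ++ [(PySem.Int.ofStr? t).getD 0] else acc)
    nums

-- B's _dedup: keep the head, drop its copies from the tail, recurse
def csvDedup : List Int → List Int
  | [] => []
  | x :: xs => x :: csvDedup (xs.filter (fun v => v != x))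
termination_by xs => xs.length
decreasing_by
  simpa using Nat.lt_succ_of_le (List.length_filter_le _ _)

def csv_ids_unique_py_alt (raw : String) : List Int :=
  let nums := ((PySem.Str.split? raw ";").getD []).foldl csvCollect []
  csvDedup nums

-- ===== PRECONDITION & SPEC =====
def Spec_csv_ids_unique_py (raw : String) (out : List Int) : Prop := out = csv_ids_unique_py_alt raw
instance (raw : String) (out : List Int) : Decidable (Spec_csv_ids_unique_py raw out) := by unfold Spec_csv_ids_unique_py; infer_instance

-- ===== CLAIM (what is proved, stated in full; the proofs are below) =====
def Claim_equal_csv_ids_unique_py : Prop := ∀ (raw : String), Dom_csv_ids_unique_py raw → Spec_csv_ids_unique_py raw (csv_ids_unique_py raw)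

-- ===== LEMMAS AND PROOFS =====

-- ---------- A's fused loop = ordered dedup of the parsed ints ----------

-- the seen-check step of A on the already-filtered integer list
def csvStep2 (st : List Int × PySem.Set Int) (v : Int) : List Int × PySem.Set Int :=
  if PySem.Set.contains st.2 v then st else (st.1 ++ [v], PySem.Set.add st.2 v)

-- one iteration of A's loop body, written as filter-then-step
lemma csvStepA_eq (st : List Int × PySem.Set Int) (part : String) :
    csvStepA st part =
      if PySem.Str.strip part != "" && PySem.Str.strIsdigit (PySem.Str.strip part)
      then csvStep2 st ((PySem.Int.ofStr? (PySem.Str.strip part)).getD 0)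
      else st := by
  by_cases h1 : PySem.Str.strip part = ""
  · simp [csvStepA, h1]
  · by_cases h2 : PySem.Str.strIsdigit (PySem.Str.strip part) = true
    · simp at h2
      simp [csvStepA, csvStep2, h1, h2]
    · simp at h2
      simp [csvStepA, h1, h2]

-- A's fold over raw parts is the seen-check fold over the parsed integers
lemma foldl_csvStepA_eq (parts : List String) (st : List Int × PySem.Set Int) :
    parts.foldl csvStepA st =
      (((parts.map PySem.Str.strip).filter (fun p => p != "" && PySem.Str.strIsdigit p)).map
        (fun p => (PySem.Int.ofStr? p).getD 0)).foldl csvStep2 st := by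
  induction parts generalizing st with
  | nil => rfl
  | cons part rest ih =>
    simp only [List.foldl_cons, List.map_cons, List.filter_cons, csvStepA_eq]
    by_cases hb : (PySem.Str.strip part != "" && PySem.Str.strIsdigit (PySem.Str.strip part)) = true
    · simp only [hb]
      simp only [if_true, List.map_cons, List.foldl_cons, ih]
    · simp only [Bool.not_eq_true] at hb
      simp only [hb]
      simp only [if_false, Bool.false_eq_true, ih]

-- from a state whose list and set coincide, csvStep2 is Set.add on both components
lemma foldl_csvStep2_eq (ys : List Int) (l : List Int) :
    ys.foldl csvStep2 (l, l) = (ys.foldl PySem.Set.add l, ys.foldl PySem.Set.add l) := by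
  induction ys generalizing l with
  | nil => rfl
  | cons v rest ih =>
    simp only [List.foldl_cons]
    have hstep : csvStep2 (l, l) v = (PySem.Set.add l v, PySem.Set.add l v) := by
      by_cases h : v ∈ l <;> simp [csvStep2, PySem.Set.add, PySem.Set.contains, h]
    rw [hstep, ih]

-- ---------- B's recursive nub = ordered dedup ----------

-- folding Set.add ignores occurrences of an element already in the accumulator
lemma foldl_add_filter_ne (xs : List Int) (s : PySem.Set Int) (x : Int) (hx : x ∈ s) :
    xs.foldl PySem.Set.add s = (xs.filter (fun v => v != x)).foldl PySem.Set.add s := by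
  induction xs generalizing s with
  | nil => rfl
  | cons v rest ih =>
    by_cases hv : v = x
    · subst hv
      have : PySem.Set.add s v = s := by simp [PySem.Set.add, PySem.Set.contains, hx]
      simp [this, ih s hx]
    · have hx' : x ∈ PySem.Set.add s v := by
        simp [PySem.Set.add]; split <;> simp [hx]
      simp [hv, ih _ hx']

-- folding Set.add from x :: s equals consing x, when x never occurs in the input
lemma foldl_add_cons (ys : List Int) (s : List Int) (x : Int) (hy : ∀ v ∈ ys, v ≠ x) :
    ys.foldl PySem.Set.add (x :: s) = x :: ys.foldl PySem.Set.add s := by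
  induction ys generalizing s with
  | nil => rfl
  | cons v rest ih =>
    have hv : v ≠ x := hy v (by simp)
    have : PySem.Set.add (x :: s) v = x :: PySem.Set.add s v := by
      simp [PySem.Set.add, PySem.Set.contains, hv]
      split <;> simp
    rw [List.foldl_cons, this, List.foldl_cons, ih _ (fun v hv => hy v (by simp [hv]))]

lemma csvDedup_eq_ofList (xs : List Int) : csvDedup xs = PySem.Set.ofList xs := by
  induction hn : xs.length using Nat.strong_induction_on generalizing xs with
  | _ n ih =>
    cases xs with
    | nil => simp [csvDedup, PySem.Set.ofList, PySem.Set.empty]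
    | cons x rest =>
      have hlt : (rest.filter (fun v => v != x)).length < n := by
        have := List.length_filter_le (fun v => v != x) rest
        simp only [List.length_cons] at hn
        omega
      rw [csvDedup, ih _ hlt _ rfl]
      rw [PySem.Set.ofList_eq_foldl, PySem.Set.ofList_eq_foldl, List.foldl_cons]
      have h1 : (PySem.Set.add ([] : List Int) x) = [x] := by simp [PySem.Set.add, PySem.Set.contains]
      rw [h1, foldl_add_filter_ne rest [x] x (by simp)]
      refine (foldl_add_cons (rest.filter (fun v => v != x)) [] x ?_).symm
      intro v hv
      have h2 := (List.mem_filter.mp hv).2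
      simpa using h2

-- ---------- single-char replace and split, characterised structurally ----------

def repSemi (c : Char) : Char := if c = ';' then ',' else c

-- prepend a prefix onto the first piece
def consHead (p : List Char) : List (List Char) → List (List Char)
  | [] => [p]
  | t :: ts => (p ++ t) :: ts

-- structural split on a single character
def splitc (c : Char) : List Char → List (List Char)
  | [] => [[]]
  | x :: xs => if x = c then [] :: splitc c xs else consHead [x] (splitc c xs)

lemma splitc_ne_nil (c : Char) (s : List Char) : splitc c s ≠ [] := by
  cases s with
  | nil => simp [splitc]
  | cons x xs =>
    simp only [splitc]
    split
    · simp
    · cases h : splitc c xs <;> simp [consHead]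

lemma consHead_nil_of_ne (r : List (List Char)) (h : r ≠ []) : consHead [] r = r := by
  cases r with
  | nil => exact absurd rfl h
  | cons t ts => simp [consHead]

lemma replace_go_single (a b : Char) :
    ∀ (fuel : Nat) (l acc : List Char), l.length ≤ fuel →
      PySem.Chars.replace.go [a] [b] fuel l acc =
        acc.reverse ++ l.map (fun c => if c = a then b else c) := by
  intro fuel
  induction fuel with
  | zero =>
    intro l acc hl
    have : l = [] := List.eq_nil_of_length_eq_zero (Nat.le_zero.mp hl)
    subst this
    simp [PySem.Chars.replace.go]
  | succ fuel ih =>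
    intro l acc hl
    cases l with
    | nil => simp [PySem.Chars.replace.go]
    | cons c t =>
      rw [PySem.Chars.replace.go]
      by_cases hc : c = a
      · subst hc
        have hp : [c].isPrefixOf (c :: t) = true := by simp [List.isPrefixOf]
        simp only [hp, if_true, List.length_cons, List.drop_succ_cons, List.length_nil,
          List.drop_zero]
        rw [ih t _ (by simpa using hl)]
        simp
      · have hp : [a].isPrefixOf (c :: t) = false := by
          simp [List.isPrefixOf]
          exact fun h => absurd h.symm hc
        simp only [hp, Bool.false_eq_true, if_false]
        rw [ih t _ (by simpa using hl)]
        simp [hc]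

lemma replace_single (a b : Char) (s : List Char) :
    PySem.Chars.replace s [a] [b] = s.map (fun c => if c = a then b else c) := by
  rw [PySem.Chars.replace]
  simp only [List.isEmpty_cons, Bool.false_eq_true, if_false]
  simpa using replace_go_single a b s.length s [] (le_refl _)

lemma splitOn_go_single (c : Char) :
    ∀ (fuel : Nat) (l cur : List Char) (acc : List (List Char)), l.length ≤ fuel →
      PySem.Chars.splitOn.go [c] fuel l cur acc =
        acc.reverse ++ consHead cur.reverse (splitc c l) := by
  intro fuel
  induction fuel with
  | zero =>
    intro l cur acc hl
    have : l = [] := List.eq_nil_of_length_eq_zero (Nat.le_zero.mp hl)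
    subst this
    simp [PySem.Chars.splitOn.go, splitc, consHead]
  | succ fuel ih =>
    intro l cur acc hl
    cases l with
    | nil => simp [PySem.Chars.splitOn.go, splitc, consHead]
    | cons x t =>
      rw [PySem.Chars.splitOn.go]
      by_cases hx : x = c
      · subst hx
        have hp : [x].isPrefixOf (x :: t) = true := by simp [List.isPrefixOf]
        simp only [hp, if_true, List.length_cons, List.drop_succ_cons, List.length_nil,
          List.drop_zero]
        rw [ih t [] _ (by simpa using hl)]
        rw [show ([] : List Char).reverse = [] from rfl,
          consHead_nil_of_ne _ (splitc_ne_nil x t)]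
        simp [splitc, consHead]
      · have hp : [c].isPrefixOf (x :: t) = false := by
          simp [List.isPrefixOf]
          exact fun h => absurd h.symm hx
        simp only [hp, Bool.false_eq_true, if_false]
        rw [ih t (x :: cur) acc (by simpa using hl)]
        have : splitc c (x :: t) = consHead [x] (splitc c t) := by simp [splitc, hx]
        rw [this]
        cases h : splitc c t with
        | nil => exact absurd h (splitc_ne_nil c t)
        | cons u us => simp [consHead]

lemma splitOn_single (c : Char) (s : List Char) :
    PySem.Chars.splitOn s [c] = splitc c s := by
  rw [PySem.Chars.splitOn]
  rw [splitOn_go_single c (s.length + 1) s [] [] (Nat.le_succ _)]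
  simp [consHead_nil_of_ne _ (splitc_ne_nil c s)]

-- splitting the ';'→',' image on ',' = splitting on ';' then each chunk on ','
lemma splitc_rep_flatMap (s : List Char) :
    splitc ',' (s.map repSemi) = (splitc ';' s).flatMap (splitc ',') := by
  induction s with
  | nil => simp [splitc]
  | cons x xs ih =>
    by_cases hx : x = ';'
    · subst hx
      have : repSemi ';' = ',' := rfl
      simp only [List.map_cons, this, splitc]
      rw [ih]
      cases h : splitc ';' xs with
      | nil => exact absurd h (splitc_ne_nil ';' xs)
      | cons t ts => simp [splitc]
    · have hr : repSemi x = x := by simp [repSemi, hx]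
      simp only [List.map_cons, hr, splitc, if_neg hx]
      cases h : splitc ';' xs with
      | nil => exact absurd h (splitc_ne_nil ';' xs)
      | cons t ts =>
        rw [h] at ih
        cases hu : splitc ',' t with
        | nil => exact absurd hu (splitc_ne_nil ',' t)
        | cons u us =>
          simp only [List.flatMap_cons, hu] at ih
          by_cases hxc : x = ','
          · subst hxc
            simp [consHead, splitc, hu, ih]
          · simp [consHead, splitc, hu, hxc, ih]

-- ---------- lifting to the two ports ----------

-- A's token list (strings)
lemma tokensA_eq (raw : String) :
    ((PySem.Str.split? (PySem.Str.replace raw ";" ",") ",").getD []) =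
      (splitc ',' (raw.toList.map repSemi)).map String.ofList := by
  have hts : (PySem.Str.replace raw ";" ",").toList = raw.toList.map repSemi := by
    rw [PySem.Str.toList_replace]
    have h1 : (";" : String).toList = [';'] := by decide
    have h2 : ("," : String).toList = [','] := by decide
    rw [h1, h2, replace_single]
    rfl
  rw [PySem.Str.split?]
  have h2 : ("," : String).toList = [','] := by decide
  rw [h2, hts, PySem.Chars.split?]
  simp [splitOn_single]

-- B's chunk list
lemma chunksB_eq (raw : String) :
    ((PySem.Str.split? raw ";").getD []) = (splitc ';' raw.toList).map String.ofList := by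
  rw [PySem.Str.split?]
  have h : (";" : String).toList = [';'] := by decide
  rw [h, PySem.Chars.split?]
  simp [splitOn_single]

-- empty strings never pass isdigit, so A's emptiness test is redundant
lemma isdigit_and_ne_empty (t : String) :
    ((t != "") && PySem.Str.strIsdigit t) = PySem.Str.strIsdigit t := by
  by_cases h : t = ""
  · subst h; decide
  · simp [h]

-- B's fold over one chunk, flattened
lemma csvCollect_eq (nums : List Int) (chunk : String) :
    csvCollect nums chunk =
      nums ++ ((((PySem.Str.split? chunk ",").getD []).filter
          (fun part => PySem.Str.strIsdigit (PySem.Str.strip part))).map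
          (fun part => (PySem.Int.ofStr? (PySem.Str.strip part)).getD 0)) := by
  rw [csvCollect]
  exact PySem.List.foldl_append_if _ _ _ _

-- B's outer fold, flattened
lemma foldl_csvCollect_eq (chunks : List String) (nums : List Int) :
    chunks.foldl csvCollect nums =
      nums ++ (((chunks.flatMap (fun ch => (PySem.Str.split? ch ",").getD [])).filter
          (fun part => PySem.Str.strIsdigit (PySem.Str.strip part))).map
          (fun part => (PySem.Int.ofStr? (PySem.Str.strip part)).getD 0)) := by
  induction chunks generalizing nums with
  | nil => simp
  | cons ch rest ih =>
    rw [List.foldl_cons, csvCollect_eq, ih]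
    simp [List.filter_append]

-- the flattened parts of B are exactly A's tokens
lemma partsB_eq_tokensA (raw : String) :
    (((PySem.Str.split? raw ";").getD []).flatMap (fun ch => (PySem.Str.split? ch ",").getD [])) =
      ((PySem.Str.split? (PySem.Str.replace raw ";" ",") ",").getD []) := by
  rw [chunksB_eq, tokensA_eq, splitc_rep_flatMap, List.flatMap_map]
  rw [List.map_flatMap]
  refine List.flatMap_congr ?_
  intro cc _
  rw [PySem.Str.split?]
  have h : ("," : String).toList = [','] := by decide
  rw [h, PySem.Chars.split?]
  simp [splitOn_single, String.toList_ofList]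

-- ===== VERDICT (by name: the statement is the Claim_ definition above) =====
theorem csv_ids_unique_py_spec : Claim_equal_csv_ids_unique_py := by
  intro raw _
  unfold Spec_csv_ids_unique_py csv_ids_unique_py csv_ids_unique_py_alt
  dsimp only
  rw [foldl_csvStepA_eq, show (PySem.Set.empty : PySem.Set Int) = ([] : List Int) from rfl,
      foldl_csvStep2_eq]
  rw [foldl_csvCollect_eq, List.nil_append, csvDedup_eq_ofList, partsB_eq_tokensA]
  rw [List.filter_map, List.map_map]
  simp only [Function.comp_def, isdigit_and_ne_empty]
  simp [PySem.Set.ofList_eq_foldl]
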